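-- pv_equiv track=rewrite | github.com/nose-cs/HULK-Compiler | src/lexer/lexer.py | _get_new_row_col
-- ===== SOURCE A (Python) =====
-- def _get_new_row_col(text, start, end, row, col):
--     if end >= len(text):
--         return row, col
--
--     for j in range(start, end):
--         if text[j] == '\n':
--             row += 1
--             col = 0
--         else:
--             col += 1
--     return row, col + 1
-- ===== SOURCE B (Python) =====
-- def _get_new_row_col(text, start, end, row, col):
--     if end >= len(text):
--         return row, col
--     seg = text[start:end]
--     rows = seg.count('\n')
--     back = seg[::-1].find('\n')  # chars after the last newline of seg, or -1 if none
--     new_col = col + len(seg) if back == -1 else back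
--     return row + rows, new_col + 1
-- ===== Notes on version B (the rewrite author's own statement) =====
-- stated objective: alternative
-- what changed: Replaces A's per-character loop and mutable row/col state with closed-form arithmetic on one slice: newline count plus the position of the first newline in the reversed slice.
-- intended difference: On a range running from a negative start to a non-negative end below len(text), A wraps each negative index to the end of the string, and on a negative end strictly inside the text with start left of its clamped position A treats the range as empty and adds 1 to col; B instead applies Python's uniform slice-bound semantics to start and end, the intended reading of those offsets. — e.g. on _get_new_row_col("ab", -1, 1, 0, 0): A returns (0, 3), B returns (0, 1)
import Mathlib
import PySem

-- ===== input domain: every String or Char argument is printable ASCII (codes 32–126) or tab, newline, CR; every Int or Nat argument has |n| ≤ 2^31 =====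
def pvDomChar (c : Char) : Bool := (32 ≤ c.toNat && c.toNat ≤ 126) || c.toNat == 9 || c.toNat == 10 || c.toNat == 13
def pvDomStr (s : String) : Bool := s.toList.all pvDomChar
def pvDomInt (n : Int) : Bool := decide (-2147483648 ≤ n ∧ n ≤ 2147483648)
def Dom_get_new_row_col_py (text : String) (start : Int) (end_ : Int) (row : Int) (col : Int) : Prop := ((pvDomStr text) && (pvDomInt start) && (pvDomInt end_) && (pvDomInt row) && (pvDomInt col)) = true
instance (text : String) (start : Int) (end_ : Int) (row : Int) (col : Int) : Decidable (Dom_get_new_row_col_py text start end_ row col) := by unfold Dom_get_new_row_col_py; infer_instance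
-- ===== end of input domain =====

-- B replaces A's per-character loop by closed-form arithmetic over one slice:
-- newline count plus the position of the first newline in the reversed slice.

-- ===== PORT A =====
-- for j in range(start, end): text[j] (negative j wraps; out of range = IndexError, excluded by Pre_,
-- where pyGetD's default is never consulted)
def get_new_row_col_py (text : String) (start : Int) (end_ : Int) (row : Int) (col : Int) : Int × Int :=
  let cs := text.toList
  if end_ ≥ (cs.length : Int) then (row, col)
  else
    let p := (PySem.List.pyRange start end_ 1).foldl
      (fun (p : Int × Int) j =>
        if PySem.List.pyGetD cs j ' ' = '\n' then (p.1 + 1, 0) else (p.1, p.2 + 1))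
      (row, col)
    (p.1, p.2 + 1)

-- ===== PORT B =====
def get_new_row_col_py_alt (text : String) (start : Int) (end_ : Int) (row : Int) (col : Int) : Int × Int :=
  let cs := text.toList
  if end_ ≥ (cs.length : Int) then (row, col)
  else
    let seg := PySem.List.slice cs (some start) (some end_)          -- text[start:end]
    let rows : Int := (PySem.Chars.count seg ['\n'] : Int)           -- seg.count('\n')
    let rev := (PySem.List.slice? seg none none (-1)).getD []        -- seg[::-1] (step ≠ 0: never none)
    let back : Int := PySem.Chars.find rev ['\n']                    -- .find('\n')
    let new_col : Int := if back = -1 then col + (seg.length : Int) else back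
    (row + rows, new_col + 1)

-- ===== PRECONDITION & SPEC =====
-- Pre_ excludes exactly the inputs where A raises IndexError: a loop index below -len(text).
def Pre_get_new_row_col_py (text : String) (start : Int) (end_ : Int) (row : Int) (col : Int) : Prop :=
  ¬ (end_ < (text.toList.length : Int) ∧ start < end_ ∧ start < -(text.toList.length : Int))
instance (text : String) (start : Int) (end_ : Int) (row : Int) (col : Int) : Decidable (Pre_get_new_row_col_py text start end_ row col) := by unfold Pre_get_new_row_col_py; infer_instance
def pvWitness_get_new_row_col_py : String × Int × Int × Int × Int := ("ab\nc", 0, 3, 5, 7)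

-- On a range reaching from a negative start to a non-negative end below len(text), A's
-- per-character negative indexing wraps each index to the end of the string; on a negative end
-- strictly inside the text with start left of its clamped position, A treats the range as empty
-- and adds 1 to col; in both cases B applies Python's uniform slice-bound semantics to start and
-- end, the intended reading of those offsets.
def D_get_new_row_col_py (text : String) (start : Int) (end_ : Int) (row : Int) (col : Int) : Prop :=
  end_ < (text.toList.length : Int) ∧
    ((start < 0 ∧ start < end_ ∧ 0 ≤ end_) ∨
     (end_ < 0 ∧ 0 ≤ start ∧ start < (text.toList.length : Int) + end_))
instance (text : String) (start : Int) (end_ : Int) (row : Int) (col : Int) : Decidable (D_get_new_row_col_py text start end_ row col) := by unfold D_get_new_row_col_py; infer_instance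

def Spec_get_new_row_col_py (text : String) (start : Int) (end_ : Int) (row : Int) (col : Int) (out : Int × Int) : Prop := ¬ D_get_new_row_col_py text start end_ row col → out = get_new_row_col_py_alt text start end_ row col
instance (text : String) (start : Int) (end_ : Int) (row : Int) (col : Int) (out : Int × Int) : Decidable (Spec_get_new_row_col_py text start end_ row col out) := by unfold Spec_get_new_row_col_py; infer_instance

def pvDiffWitness_get_new_row_col_py : String × Int × Int × Int × Int := ("ab", -1, 1, 0, 0)
def pvDiffWitnessOut_get_new_row_col_py : (Int × Int) × (Int × Int) := ((0, 3), (0, 1))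

-- ===== CLAIM (what is proved, stated in full; the proofs are below) =====
def Claim_unchanged_get_new_row_col_py : Prop := ∀ (text : String) (start : Int) (end_ : Int) (row : Int) (col : Int), Dom_get_new_row_col_py text start end_ row col → Pre_get_new_row_col_py text start end_ row col → Spec_get_new_row_col_py text start end_ row col (get_new_row_col_py text start end_ row col)
def Claim_changed_get_new_row_col_py : Prop := Dom_get_new_row_col_py (pvDiffWitness_get_new_row_col_py.1) (pvDiffWitness_get_new_row_col_py.2.1) (pvDiffWitness_get_new_row_col_py.2.2.1) (pvDiffWitness_get_new_row_col_py.2.2.2.1) (pvDiffWitness_get_new_row_col_py.2.2.2.2) ∧ Pre_get_new_row_col_py (pvDiffWitness_get_new_row_col_py.1) (pvDiffWitness_get_new_row_col_py.2.1) (pvDiffWitness_get_new_row_col_py.2.2.1) (pvDiffWitness_get_new_row_col_py.2.2.2.1) (pvDiffWitness_get_new_row_col_py.2.2.2.2) ∧ D_get_new_row_col_py (pvDiffWitness_get_new_row_col_py.1) (pvDiffWitness_get_new_row_col_py.2.1) (pvDiffWitness_get_new_row_col_py.2.2.1) (pvDiffWitness_get_new_row_col_py.2.2.2.1) (pvDiffWitness_get_new_row_col_py.2.2.2.2)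 ∧ get_new_row_col_py (pvDiffWitness_get_new_row_col_py.1) (pvDiffWitness_get_new_row_col_py.2.1) (pvDiffWitness_get_new_row_col_py.2.2.1) (pvDiffWitness_get_new_row_col_py.2.2.2.1) (pvDiffWitness_get_new_row_col_py.2.2.2.2) = pvDiffWitnessOut_get_new_row_col_py.1 ∧ get_new_row_col_py_alt (pvDiffWitness_get_new_row_col_py.1) (pvDiffWitness_get_new_row_col_py.2.1) (pvDiffWitness_get_new_row_col_py.2.2.1) (pvDiffWitness_get_new_row_col_py.2.2.2.1) (pvDiffWitness_get_new_row_col_py.2.2.2.2) = pvDiffWitnessOut_get_new_row_col_py.2 ∧ pvDiffWitnessOut_get_new_row_col_py.1 ≠ pvDiffWitnessOut_get_new_row_col_py.2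
def Claim_exact_get_new_row_col_py : Prop := ∀ (text : String) (start : Int) (end_ : Int) (row : Int) (col : Int), Dom_get_new_row_col_py text start end_ row col → Pre_get_new_row_col_py text start end_ row col → D_get_new_row_col_py text start end_ row col → get_new_row_col_py text start end_ row col ≠ get_new_row_col_py_alt text start end_ row col

-- ===== LEMMAS AND PROOFS =====

-- A's loop body as a step function
def pvStep (p : Int × Int) (c : Char) : Int × Int :=
  if c = '\n' then (p.1 + 1, 0) else (p.1, p.2 + 1)

-- Chars.count with a single-character needle is List.count
lemma pv_count_go_one (c : Char) : ∀ (l : List Char) (fuel acc : Nat), l.length ≤ fuel →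
    PySem.Chars.count.go [c] fuel l acc = acc + l.count c := by
  intro l
  induction l with
  | nil => intro fuel acc _; cases fuel <;> simp [PySem.Chars.count.go]
  | cons h t ih =>
    intro fuel acc hf
    cases fuel with
    | zero => simp at hf
    | succ f =>
      have hf' : t.length ≤ f := by simpa using hf
      rw [PySem.Chars.count.go]
      by_cases hc : c = h
      · subst hc
        simp only [List.isPrefixOf, Bool.and_true, beq_self_eq_true, if_pos,
          List.length_cons, List.length_nil, List.drop_succ_cons, List.drop_zero]
        rw [ih f (acc+1) hf', List.count_cons]
        simp; omega
      · simp only [List.isPrefixOf, Bool.and_true]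
        rw [if_neg (by simpa using hc), ih f acc hf', List.count_cons]
        simp [Ne.symm hc]

lemma pv_count_one (c : Char) (l : List Char) : PySem.Chars.count l [c] = l.count c := by
  rw [PySem.Chars.count]
  simp [pv_count_go_one c l l.length 0 le_rfl]

-- Chars.find with a single-character needle is idxOf (or -1)
lemma pv_find_go_one (c : Char) : ∀ (l : List Char) (k : Nat),
    PySem.Chars.find.go [c] l k = if c ∈ l then ((k : Int) + l.idxOf c) else -1 := by
  intro l
  induction l with
  | nil => intro k; simp [PySem.Chars.find.go]
  | cons h t ih =>
    intro k
    rw [PySem.Chars.find.go]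
    by_cases hc : c = h
    · subst hc; simp [List.isPrefixOf]
    · rw [if_neg (by simp [List.isPrefixOf]; simpa using hc), ih (k+1)]
      by_cases hm : c ∈ t
      · simp [hm, hc, Ne.symm hc]
        omega
      · simp [hm, hc]

lemma pv_find_one (c : Char) (l : List Char) :
    PySem.Chars.find l [c] = if c ∈ l then (l.idxOf c : Int) else -1 := by
  rw [PySem.Chars.find, pv_find_go_one]
  simp

-- the fold's row component
lemma pv_fold_fst (l : List Char) (row col : Int) :
    (l.foldl pvStep (row, col)).1 = row + l.count '\n' := by
  induction l generalizing row col with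
  | nil => simp
  | cons h t ih =>
    by_cases hc : h = '\n'
    · subst hc; simp [pvStep, ih]; omega
    · simp [pvStep, hc, ih]

-- the fold's col component
lemma pv_fold_snd (l : List Char) (row col : Int) :
    (l.foldl pvStep (row, col)).2 =
      if '\n' ∈ l then (l.reverse.idxOf '\n' : Int) else col + l.length := by
  induction l generalizing row col with
  | nil => simp
  | cons h t ih =>
    by_cases hc : h = '\n'
    · subst hc
      simp only [List.foldl_cons, pvStep, ih, List.mem_cons, true_or, if_pos]
      by_cases hm : '\n' ∈ t
      · simp only [hm, if_pos, List.reverse_cons]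
        rw [List.idxOf_append_of_mem (by simpa using hm)]
      · simp [hm]
        rw [List.idxOf_append_of_notMem (by simpa using hm)]
        simp
    · simp only [List.foldl_cons, pvStep, if_neg hc, ih]
      by_cases hm : '\n' ∈ t
      · simp only [List.mem_cons, hm, or_true, if_pos, List.reverse_cons]
        rw [List.idxOf_append_of_mem (by simpa using hm)]
      · simp [hm, Ne.symm hc]
        omega

-- B's main-case value equals the fold over the slice
lemma pv_alt_fold (seg : List Char) (row col : Int) :
    (row + (PySem.Chars.count seg ['\n'] : Int),
      (if PySem.Chars.find ((PySem.List.slice? seg none none (-1)).getD []) ['\n'] = -1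
        then col + (seg.length : Int)
        else PySem.Chars.find ((PySem.List.slice? seg none none (-1)).getD []) ['\n']) + 1)
    = ((seg.foldl pvStep (row, col)).1, (seg.foldl pvStep (row, col)).2 + 1) := by
  rw [PySem.List.slice?_none_none_neg_one]
  simp only [Option.getD_some, pv_find_one, pv_count_one, pv_fold_fst, pv_fold_snd]
  by_cases hm : '\n' ∈ seg
  · have : '\n' ∈ seg.reverse := by simpa using hm
    simp [hm, this]
  · have : '\n' ∉ seg.reverse := by simpa using hm
    simp [hm, this]

-- A's loop over in-range indices is the fold over the corresponding sublist
lemma pv_loop_eq (cs : List Char) : ∀ (n a : Nat) (p : Int × Int), a + n ≤ cs.length →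
    (PySem.List.pyRange a ((a : Int) + n) 1).foldl
      (fun (p : Int × Int) j => if PySem.List.pyGetD cs j ' ' = '\n' then (p.1 + 1, 0) else (p.1, p.2 + 1)) p
    = ((cs.drop a).take n).foldl pvStep p := by
  intro n
  induction n with
  | zero => intro a p _; simp [PySem.List.pyRange_one_eq_nil]
  | succ m ih =>
    intro a p h
    have ha : a < cs.length := by omega
    rw [PySem.List.pyRange_one_cons (by push_cast; omega)]
    rw [List.drop_eq_getElem_cons ha]
    simp only [List.foldl_cons, List.take_succ_cons]
    rw [PySem.List.pyGetD_eq_getElem cs ' ' (by positivity) (by exact_mod_cast ha)]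
    have h1 : ((a : Int) + 1) = ((a + 1 : Nat) : Int) := by push_cast; ring
    rw [h1]
    have h2 : (a : Int) + (m + 1 : Nat) = ((a + 1 : Nat) : Int) + (m : Nat) := by push_cast; ring
    rw [h2, ih (a+1) _ (by omega)]
    simp only [pvStep, Int.toNat_natCast]
    rfl

-- Int-argument form of pv_loop_eq
lemma pv_loop_eq' (cs : List Char) (a b : Int) (p : Int × Int)
    (h0 : 0 ≤ a) (hab : a ≤ b) (hb : b ≤ (cs.length : Int)) :
    (PySem.List.pyRange a b 1).foldl
      (fun (p : Int × Int) j => if PySem.List.pyGetD cs j ' ' = '\n' then (p.1 + 1, 0) else (p.1, p.2 + 1)) p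
    = ((cs.drop a.toNat).take ((b - a).toNat)).foldl pvStep p := by
  have hr : PySem.List.pyRange a b 1
      = PySem.List.pyRange ((a.toNat : Nat) : Int) (((a.toNat : Nat) : Int) + (((b - a).toNat : Nat) : Int)) 1 := by
    congr 1 <;> omega
  rw [hr, pv_loop_eq cs ((b - a).toNat) a.toNat p (by omega)]

lemma pv_slice_nil (cs : List Char) (a b : Int)
    (h : PySem.List.clampIdx cs.length b ≤ PySem.List.clampIdx cs.length a) :
    PySem.List.slice cs (some a) (some b) = [] := by
  have := PySem.List.length_slice cs a b
  have h0 : (PySem.List.slice cs (some a) (some b)).length = 0 := by omega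
  exact List.eq_nil_of_length_eq_zero h0

-- slice unfolded to its clamped drop/take form
lemma pv_slice_eq {α : Type} (cs : List α) (a b : Int) :
    PySem.List.slice cs (some a) (some b)
    = (cs.drop (PySem.List.clampIdx cs.length a)).take
        (PySem.List.clampIdx cs.length b - PySem.List.clampIdx cs.length a) := rfl

lemma pv_clamp_neg (n : Nat) (i : Int) (h1 : i < 0) (h2 : 0 ≤ (n : Int) + i) :
    PySem.List.clampIdx n i = ((n : Int) + i).toNat := by
  unfold PySem.List.clampIdx; split_ifs <;> omega

lemma pv_clamp_nonneg (n : Nat) (i : Int) (h1 : 0 ≤ i) (h2 : i ≤ (n : Int)) :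
    PySem.List.clampIdx n i = i.toNat := by
  unfold PySem.List.clampIdx; split_ifs <;> omega

-- A's loop over a range of negative (wrapping) indices
lemma pv_loop_neg (cs : List Char) : ∀ (n : Nat) (a : Int) (p : Int × Int),
    -(cs.length : Int) ≤ a → a + n ≤ 0 →
    (PySem.List.pyRange a (a + n) 1).foldl
      (fun (p : Int × Int) j => if PySem.List.pyGetD cs j ' ' = '\n' then (p.1 + 1, 0) else (p.1, p.2 + 1)) p
    = ((cs.drop ((cs.length : Int) + a).toNat).take n).foldl pvStep p := by
  intro n
  induction n with
  | zero => intro a p _ _; simp [PySem.List.pyRange_one_eq_nil]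
  | succ m ih =>
    intro a p hge hle
    have ha : a < 0 := by omega
    have hL : ((cs.length : Int) + a).toNat < cs.length := by omega
    rw [PySem.List.pyRange_one_cons (by push_cast; omega)]
    rw [List.drop_eq_getElem_cons hL]
    simp only [List.foldl_cons, List.take_succ_cons]
    have hget : PySem.List.pyGetD cs a ' ' = cs[((cs.length : Int) + a).toNat]'hL := by
      have hk : a = -(((-a).toNat : Nat) : Int) := by omega
      conv_lhs => rw [hk]
      rw [PySem.List.pyGetD_neg_natCast cs ((-a).toNat) ' ' (by omega) (by omega)]
      simp only [show cs.length - (-a).toNat = ((cs.length : Int) + a).toNat from by omega]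
    rw [hget]
    have h1 : a + (((m + 1 : Nat)) : Int) = (a + 1) + ((m : Nat) : Int) := by push_cast; omega
    rw [h1, ih (a + 1) _ (by omega) (by omega)]
    have h3 : ((cs.length : Int) + (a + 1)).toNat = ((cs.length : Int) + a).toNat + 1 := by omega
    rw [h3]
    simp only [pvStep]

-- ===== VERDICT (by name: the statement is the Claim_ definition above) =====
theorem get_new_row_col_py_spec : Claim_unchanged_get_new_row_col_py := by
  intro text start end_ row col _ hPre
  unfold Spec_get_new_row_col_py
  intro hD
  unfold get_new_row_col_py get_new_row_col_py_alt
  set cs := text.toList with hcs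
  by_cases hend : end_ ≥ (cs.length : Int)
  · simp only [if_pos hend]
  · simp only [if_neg hend]
    push_neg at hend
    unfold D_get_new_row_col_py at hD
    unfold Pre_get_new_row_col_py at hPre
    rw [← hcs] at hD hPre
    by_cases hlt : start < end_
    · by_cases hs0 : 0 ≤ start
      · -- main case: 0 ≤ start < end_ < len
        have he0 : 0 ≤ end_ := by omega
        have hseg : PySem.List.slice cs (some start) (some end_)
            = (cs.drop start.toNat).take ((end_ - start).toNat) := by
          rw [PySem.List.slice_toNat cs hs0 he0]
          congr 1
          omega
        rw [hseg, pv_alt_fold, pv_loop_eq' cs start end_ (row, col) hs0 (le_of_lt hlt) (le_of_lt hend)]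
      · -- wrap case: -len ≤ start < end_ < 0: A's negative indexing is exactly B's clamped slice
        push_neg at hs0
        have he0 : end_ < 0 := by
          by_contra h
          exact hD ⟨hend, Or.inl ⟨hs0, hlt, by omega⟩⟩
        have hge : -(cs.length : Int) ≤ start := by omega
        have hseg : PySem.List.slice cs (some start) (some end_)
            = (cs.drop ((cs.length : Int) + start).toNat).take ((end_ - start).toNat) := by
          rw [pv_slice_eq, pv_clamp_neg cs.length start hs0 (by omega),
            pv_clamp_neg cs.length end_ he0 (by omega)]
          congr 1
          omega
        rw [hseg, pv_alt_fold]
        have e0 : PySem.List.pyRange start end_ 1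
            = PySem.List.pyRange start (start + (((end_ - start).toNat : Nat) : Int)) 1 := by
          congr 1
          omega
        rw [e0, pv_loop_neg cs ((end_ - start).toNat) start (row, col) hge (by omega)]
    · -- empty range: both sides are (row, col + 1)
      have hnil : PySem.List.slice cs (some start) (some end_) = [] := by
        apply pv_slice_nil
        unfold PySem.List.clampIdx
        have hD2 : ¬ (end_ < 0 ∧ 0 ≤ start ∧ start < (cs.length : Int) + end_) := fun h => hD ⟨hend, Or.inr h⟩
        split_ifs <;> omega
      rw [PySem.List.pyRange_one_eq_nil (by omega), hnil,
        PySem.List.slice?_none_none_neg_one]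
      simp [pv_count_one, pv_find_one]

theorem get_new_row_col_py_changed : Claim_changed_get_new_row_col_py := by
  unfold Claim_changed_get_new_row_col_py; decide

theorem get_new_row_col_py_tight : Claim_exact_get_new_row_col_py := by
  intro text start end_ row col _ hPre hD
  unfold get_new_row_col_py get_new_row_col_py_alt
  set cs := text.toList with hcs
  unfold D_get_new_row_col_py at hD
  unfold Pre_get_new_row_col_py at hPre
  rw [← hcs] at hD hPre
  obtain ⟨hend, hC⟩ := hD
  simp only [if_neg (not_le.mpr hend)]
  rcases hC with ⟨hs0, hlt, he0⟩ | ⟨he0, hs0, hlt⟩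
  · -- start < 0 ≤ end_ < len: A wraps, B slices
    have hge : -(cs.length : Int) ≤ start := by omega
    have hL0 : ((cs.length : Int) + start).toNat < cs.length := by omega
    set u : Nat := ((cs.length : Int) + start).toNat with hu
    have hseg : PySem.List.slice cs (some start) (some end_)
        = (cs.drop u).take (end_.toNat - u) := by
      rw [pv_slice_eq, pv_clamp_neg cs.length start hs0 (by omega),
        pv_clamp_nonneg cs.length end_ he0 (by omega)]
    rw [hseg, pv_alt_fold]
    have e0 : PySem.List.pyRange start end_ 1
        = PySem.List.pyRange start 0 1 ++ PySem.List.pyRange 0 end_ 1 :=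
      PySem.List.pyRange_one_append start 0 end_ (by omega) (by omega)
    have e1 : PySem.List.pyRange start 0 1
        = PySem.List.pyRange start (start + (((-start).toNat : Nat) : Int)) 1 := by
      congr 1
      omega
    rw [e0, List.foldl_append, e1,
      pv_loop_neg cs ((-start).toNat) start (row, col) hge (by omega),
      pv_loop_eq' cs 0 end_ _ le_rfl he0 (le_of_lt hend), ← List.foldl_append]
    have hT : (cs.drop u).take ((-start).toNat) = cs.drop u :=
      List.take_of_length_le (by simp [List.length_drop]; omega)
    rw [hT]
    simp only [Int.toNat_zero, List.drop_zero, sub_zero]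
    set T : List Char := cs.drop u with hTdef
    set H : List Char := cs.take end_.toNat with hHdef
    set S : List Char := T.take (end_.toNat - u) with hSdef
    intro heq
    have h1 := congrArg Prod.fst heq
    have h2 := congrArg Prod.snd heq
    dsimp only at h1 h2
    rw [pv_fold_fst, pv_fold_fst, List.count_append] at h1
    have hSle : S.count '\n' ≤ T.count '\n' :=
      (List.take_sublist _ _).count_le '\n'
    have hHz : H.count '\n' = 0 := by omega
    have hST : S.count '\n' = T.count '\n' := by omega
    have hTlen : T.length = cs.length - u := by simp [hTdef]
    have hHlen : H.length = end_.toNat := by simp [hHdef]; omega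
    have hSlen : S.length = min (end_.toNat - u) T.length := by simp [hSdef]
    by_cases hz : T.count '\n' = 0
    · -- no newline anywhere: columns advance by the number of processed characters
      have hmem : '\n' ∉ T ++ H := by
        simp only [List.mem_append]
        rintro (h | h)
        · exact List.count_eq_zero.mp hz h
        · exact List.count_eq_zero.mp hHz h
      have hmemS : '\n' ∉ S := List.count_eq_zero.mp (by omega)
      rw [pv_fold_snd, pv_fold_snd, if_neg hmem, if_neg hmemS] at h2
      simp only [List.length_append] at h2
      omega
    · -- a newline in T: A's column counts from a newline at least end_ earlier than B's
      have hmemT : '\n' ∈ T := by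
        by_contra h
        exact hz (List.count_eq_zero.mpr h)
      have hmemS : '\n' ∈ S := by
        by_contra h
        rw [List.count_eq_zero.mpr h] at hST
        exact hz hST.symm
      have hmem : '\n' ∈ T ++ H := List.mem_append.mpr (Or.inl hmemT)
      have hmemH : '\n' ∉ H.reverse := by
        rw [List.mem_reverse]
        exact List.count_eq_zero.mp hHz
      rw [pv_fold_snd, pv_fold_snd, if_pos hmem, if_pos hmemS] at h2
      rw [List.reverse_append, List.idxOf_append_of_notMem hmemH] at h2
      have hidxS : S.reverse.idxOf '\n' < S.length := by
        have := List.idxOf_lt_length_of_mem (List.mem_reverse.mpr hmemS)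
        simpa using this
      have : S.length ≤ end_.toNat := by omega
      simp only [List.length_reverse, hHlen] at h2
      omega
  · -- end_ < 0 ≤ start < len + end_: A sees an empty range, B a nonempty slice
    have hseg : PySem.List.slice cs (some start) (some end_)
        = (cs.drop start.toNat).take (((cs.length : Int) + end_).toNat - start.toNat) := by
      rw [pv_slice_eq, pv_clamp_nonneg cs.length start hs0 (by omega),
        pv_clamp_neg cs.length end_ he0 (by omega)]
    rw [hseg, pv_alt_fold, PySem.List.pyRange_one_eq_nil (by omega)]
    set S : List Char := (cs.drop start.toNat).take (((cs.length : Int) + end_).toNat - start.toNat) with hSdef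
    have hSlen : S.length = ((cs.length : Int) + end_).toNat - start.toNat := by
      simp [hSdef]
      omega
    intro heq
    have h1 := congrArg Prod.fst heq
    have h2 := congrArg Prod.snd heq
    simp only [List.foldl_nil] at h1 h2
    rw [pv_fold_fst] at h1
    have hz : S.count '\n' = 0 := by omega
    have hmem : '\n' ∉ S := List.count_eq_zero.mp hz
    rw [pv_fold_snd, if_neg hmem] at h2
    omega
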